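-- pv_equiv track=rewrite | github.com/aryabhishek/sortingTechniques | MLQuestions/three.py | solve
-- ===== SOURCE A (Python) =====
-- def solve(i, n, arr, memo):
--     if i == n:
--         return 0
--     if i in memo:
--         return memo[i]
--     cost = float("inf")
--     if i + 1 <= n:
--         cost = min(cost, abs(arr[i - 1] - arr[i]) + solve(i + 1, n, arr, memo))
--     if i + 3 <= n:
--         cost = min(cost, abs(arr[i - 1] - arr[i + 2]) + solve(i + 3, n, arr, memo))
--     memo[i] = cost
--     return cost
-- ===== SOURCE B (Python) =====
-- def solve(i, n, arr, memo):
--     # Bottom-up tabulation of the same recurrence; honours pre-seeded memo entries.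
--     # (Return value only: unlike A, this does not write computed costs back into memo.)
--     dp = {}
--
--     def val(j):
--         if j == n:
--             return 0
--         if j in memo:
--             return memo[j]
--         return dp.get(j, float("inf"))  # states never tabulated are unreachable: infinite cost
--
--     for j in range(n - 1, i - 1, -1):
--         if j in memo:
--             continue
--         c = abs(arr[j - 1] - arr[j]) + val(j + 1)
--         if j + 3 <= n:
--             c = min(c, abs(arr[j - 1] - arr[j + 2]) + val(j + 3))
--         dp[j] = c
--     return val(i)
-- ===== Notes on version B (the rewrite author's own statement) =====
-- stated objective: alternative
-- what changed: Replaces A's top-down memoized recursion by an iterative bottom-up tabulation: a dp table is filled in one loop from n-1 down to i (honouring pre-seeded memo entries), with no recursion and no mutation of the caller's memo; same O(n) states and values.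
-- outside the precondition, e.g. on solve(0, 6, [0, 1, 2, 3], {1: 10, 3: 100}): A returns 13, B raises IndexError; on solve(2, 5, [], {2: 7}): A returns 7, B raises IndexError
import Mathlib
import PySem

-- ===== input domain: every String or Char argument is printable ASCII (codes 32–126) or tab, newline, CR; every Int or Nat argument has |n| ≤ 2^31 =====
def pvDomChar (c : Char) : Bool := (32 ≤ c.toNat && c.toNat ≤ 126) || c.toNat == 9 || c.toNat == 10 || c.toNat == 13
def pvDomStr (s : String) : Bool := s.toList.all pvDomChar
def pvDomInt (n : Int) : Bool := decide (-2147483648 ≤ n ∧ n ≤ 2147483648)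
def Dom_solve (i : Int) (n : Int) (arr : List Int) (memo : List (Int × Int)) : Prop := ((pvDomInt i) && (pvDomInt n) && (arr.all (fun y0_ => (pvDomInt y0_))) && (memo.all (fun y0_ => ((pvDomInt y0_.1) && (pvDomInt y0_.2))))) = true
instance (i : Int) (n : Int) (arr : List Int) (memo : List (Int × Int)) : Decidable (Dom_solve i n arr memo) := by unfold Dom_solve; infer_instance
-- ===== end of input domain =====

-- B replaces A's memoized recursion by bottom-up tabulation (same recurrence, loop from n-1
-- down to i); the proved equivalence is about the RETURN value only: A also writes the computed
-- costs back into the caller's memo dict, B does not mutate memo.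

-- ===== PORT A =====
-- A's memo mutation is threaded explicitly: solveA returns (return value, updated memo).
-- arr[x] is PySem.List.pyGetD arr x 0: Pre_solve keeps every access in range (incl. Python's
-- negative-index wrap), so the default 0 is never the value used inside Pre_solve.
def solveA (i : Int) (n : Int) (arr : List Int) (m : PySem.Dict Int Int) :
    Int × PySem.Dict Int Int :=
  if _hn : i = n then (0, m)
  else
    match m.get? i with
    | some v => (v, m)                      -- `if i in memo: return memo[i]`
    | none =>
      if h1 : i + 1 ≤ n then
        let r1 := solveA (i+1) n arr m
        -- cost = min(inf, |arr[i-1]-arr[i]| + solve(i+1)) = that sum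
        let c1 := |PySem.List.pyGetD arr (i-1) 0 - PySem.List.pyGetD arr i 0| + r1.1
        if h3 : i + 3 ≤ n then
          let r3 := solveA (i+3) n arr r1.2
          let c := min c1 (|PySem.List.pyGetD arr (i-1) 0 - PySem.List.pyGetD arr (i+2) 0| + r3.1)
          (c, r3.2.insert i c)
        else (c1, r1.2.insert i c1)
      else
        -- Python: i+1 > n forces i+3 > n too; cost stays float('inf'), memo[i] = inf, return inf —
        -- not an Int value, so Pre_solve excludes this state; the port returns 0 here.
        (0, m.insert i 0)
termination_by (n - i).toNat
decreasing_by all_goals omega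

def solve (i : Int) (n : Int) (arr : List Int) (memo : List (Int × Int)) : Int :=
  (solveA i n arr (PySem.Dict.mk memo)).1

-- ===== PORT B =====
-- Source B's `val(j)`: the dp.get default float('inf') is only reached outside Pre_solve
-- (an unreachable state); the port returns 0 there instead (no Int for inf).
def valB (n : Int) (m dp : PySem.Dict Int Int) (j : Int) : Int :=
  if j = n then 0
  else
    match m.get? j with
    | some v => v
    | none => (dp.get? j).getD 0

-- one iteration of Source B's `for j in range(n-1, i-1, -1)` loop body
def stepB (n : Int) (arr : List Int) (m : PySem.Dict Int Int)
    (dp : PySem.Dict Int Int) (j : Int) : PySem.Dict Int Int :=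
  if m.contains j then dp
  else
    let c1 := |PySem.List.pyGetD arr (j-1) 0 - PySem.List.pyGetD arr j 0| + valB n m dp (j+1)
    let c := if j + 3 ≤ n then
        min c1 (|PySem.List.pyGetD arr (j-1) 0 - PySem.List.pyGetD arr (j+2) 0| + valB n m dp (j+3))
      else c1
    dp.insert j c

def solve_alt (i : Int) (n : Int) (arr : List Int) (memo : List (Int × Int)) : Int :=
  let m := PySem.Dict.mk memo
  let dp := (PySem.List.pyRange (n-1) (i-1) (-1)).foldl (stepB n arr m) PySem.Dict.empty
  valB n m dp i

-- ===== PRECONDITION & SPEC =====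
-- Pre_solve excludes exactly the inputs on which the Python A raises or returns float('inf')
-- (not an int): i > n without a memo entry returns inf; out-of-range array accesses at the
-- non-memoized states raise IndexError.  It also excludes inputs with n > len(arr) that A only
-- survives because pre-seeded memo entries skip the out-of-range states — B's tabulation visits
-- every state from n-1 down to i, so B naturally raises IndexError there.
def Pre_solve (i : Int) (n : Int) (arr : List Int) (memo : List (Int × Int)) : Prop :=
  i = n ∨ (n < i ∧ i ∈ memo.map Prod.fst) ∨
    (i ≤ n ∧ 1 - (arr.length : Int) ≤ i ∧ n ≤ (arr.length : Int))
instance (i : Int) (n : Int) (arr : List Int) (memo : List (Int × Int)) : Decidable (Pre_solve i n arr memo) := by unfold Pre_solve; infer_instance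

def pvWitness_solve : Int × Int × List Int × (List (Int × Int)) := (0, 2, [3, 1, 2], [(5, 9)])

def Spec_solve (i : Int) (n : Int) (arr : List Int) (memo : List (Int × Int)) (out : Int) : Prop := out = solve_alt i n arr memo
instance (i : Int) (n : Int) (arr : List Int) (memo : List (Int × Int)) (out : Int) : Decidable (Spec_solve i n arr memo out) := by unfold Spec_solve; infer_instance

-- ===== CLAIM (what is proved, stated in full; the proofs are below) =====
def Claim_equal_solve : Prop := ∀ (i : Int) (n : Int) (arr : List Int) (memo : List (Int × Int)), Dom_solve i n arr memo → Pre_solve i n arr memo → Spec_solve i n arr memo (solve i n arr memo)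

-- ===== LEMMAS AND PROOFS =====

-- The pure recurrence both ports compute: value of state i w.r.t. the INITIAL memo m0.
def fSpec (i n : Int) (arr : List Int) (m0 : PySem.Dict Int Int) : Int :=
  if _hn : i = n then 0
  else
    match m0.get? i with
    | some v => v
    | none =>
      if h1 : i + 1 ≤ n then
        let c1 := |PySem.List.pyGetD arr (i-1) 0 - PySem.List.pyGetD arr i 0| + fSpec (i+1) n arr m0
        if h3 : i + 3 ≤ n then
          min c1 (|PySem.List.pyGetD arr (i-1) 0 - PySem.List.pyGetD arr (i+2) 0| + fSpec (i+3) n arr m0)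
        else c1
      else 0
termination_by (n - i).toNat
decreasing_by all_goals omega

-- A-side: memoized recursion computes fSpec, and keeps the memo consistent with fSpec.
lemma solveA_fspec (n : Int) (arr : List Int) (m0 : PySem.Dict Int Int) :
    ∀ (K : Nat) (i : Int) (m : PySem.Dict Int Int), (n - i).toNat ≤ K →
    (∀ j v, m0.get? j = some v → m.get? j = some v) →
    (∀ j v, j ≠ n → m.get? j = some v → v = fSpec j n arr m0) →
    (solveA i n arr m).1 = fSpec i n arr m0 ∧
    (∀ j v, m0.get? j = some v → (solveA i n arr m).2.get? j = some v) ∧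
    (∀ j v, j ≠ n → (solveA i n arr m).2.get? j = some v → v = fSpec j n arr m0) := by
  intro K
  induction K using Nat.strong_induction_on with
  | _ K ih =>
  intro i m hK hsub hinv
  by_cases hn : i = n
  · have hA : solveA i n arr m = (0, m) := by rw [solveA]; simp [hn]
    refine ⟨?_, ?_, ?_⟩ <;> rw [hA]
    · rw [fSpec]; simp [hn]
    · exact hsub
    · exact hinv
  · cases hmi : m.get? i with
    | some v =>
      have hA : solveA i n arr m = (v, m) := by rw [solveA]; simp [hn, hmi]
      refine ⟨?_, ?_, ?_⟩ <;> rw [hA]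
      · exact hinv i v hn hmi
      · exact hsub
      · exact hinv
    | none =>
      have hm0i : m0.get? i = none := by
        cases h0 : m0.get? i with
        | none => rfl
        | some w => rw [hsub i w h0] at hmi; exact absurd hmi (by simp)
      by_cases h1 : i + 1 ≤ n
      · have hK1 : (n - (i+1)).toNat ≤ K - 1 := by omega
        have hKpos : K - 1 < K := by omega
        obtain ⟨e1, hsub1, hinv1⟩ := ih (K-1) hKpos (i+1) m hK1 hsub hinv
        by_cases h3 : i + 3 ≤ n
        · obtain ⟨e3, hsub3, hinv3⟩ :=
            ih (K-1) hKpos (i+3) (solveA (i+1) n arr m).2 (by omega) hsub1 hinv1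
          have hA : solveA i n arr m =
              (min (|PySem.List.pyGetD arr (i-1) 0 - PySem.List.pyGetD arr i 0| + (solveA (i+1) n arr m).1)
                   (|PySem.List.pyGetD arr (i-1) 0 - PySem.List.pyGetD arr (i+2) 0| + (solveA (i+3) n arr (solveA (i+1) n arr m).2).1),
               (solveA (i+3) n arr (solveA (i+1) n arr m).2).2.insert i
                 (min (|PySem.List.pyGetD arr (i-1) 0 - PySem.List.pyGetD arr i 0| + (solveA (i+1) n arr m).1)
                      (|PySem.List.pyGetD arr (i-1) 0 - PySem.List.pyGetD arr (i+2) 0| + (solveA (i+3) n arr (solveA (i+1) n arr m).2).1))) := by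
            rw [solveA]; simp [hn, hmi, h1, h3]
          have hc : min (|PySem.List.pyGetD arr (i-1) 0 - PySem.List.pyGetD arr i 0| + (solveA (i+1) n arr m).1)
                   (|PySem.List.pyGetD arr (i-1) 0 - PySem.List.pyGetD arr (i+2) 0| + (solveA (i+3) n arr (solveA (i+1) n arr m).2).1)
              = fSpec i n arr m0 := by
            rw [fSpec]; simp [hn, hm0i, h1, h3, e1, e3]
          refine ⟨?_, ?_, ?_⟩ <;> rw [hA]
          · exact hc
          · intro j v hj
            rw [PySem.Dict.get?_insert]
            have hji : ¬ j = i := by intro he; rw [he, hm0i] at hj; exact absurd hj (by simp)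
            rw [if_neg hji]; exact hsub3 j v hj
          · intro j v hjn hj
            rw [PySem.Dict.get?_insert] at hj
            by_cases hji : j = i
            · rw [if_pos hji] at hj
              injection hj with h
              rw [← h, hji, hc]
            · rw [if_neg hji] at hj; exact hinv3 j v hjn hj
        · have hA : solveA i n arr m =
              (|PySem.List.pyGetD arr (i-1) 0 - PySem.List.pyGetD arr i 0| + (solveA (i+1) n arr m).1,
               (solveA (i+1) n arr m).2.insert i
                 (|PySem.List.pyGetD arr (i-1) 0 - PySem.List.pyGetD arr i 0| + (solveA (i+1) n arr m).1)) := by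
            rw [solveA]; simp [hn, hmi, h1, h3]
          have hc : |PySem.List.pyGetD arr (i-1) 0 - PySem.List.pyGetD arr i 0| + (solveA (i+1) n arr m).1
              = fSpec i n arr m0 := by
            rw [fSpec]; simp [hn, hm0i, h1, h3, e1]
          refine ⟨?_, ?_, ?_⟩ <;> rw [hA]
          · exact hc
          · intro j v hj
            rw [PySem.Dict.get?_insert]
            have hji : ¬ j = i := by intro he; rw [he, hm0i] at hj; exact absurd hj (by simp)
            rw [if_neg hji]; exact hsub1 j v hj
          · intro j v hjn hj
            rw [PySem.Dict.get?_insert] at hj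
            by_cases hji : j = i
            · rw [if_pos hji] at hj
              injection hj with h
              rw [← h, hji, hc]
            · rw [if_neg hji] at hj; exact hinv1 j v hjn hj
      · have hA : solveA i n arr m = (0, m.insert i 0) := by
          rw [solveA]; simp [hn, hmi, h1]
        have hc : (0 : Int) = fSpec i n arr m0 := by
          rw [fSpec]; simp [hn, hm0i, h1]
        refine ⟨?_, ?_, ?_⟩ <;> rw [hA]
        · exact hc
        · intro j v hj
          rw [PySem.Dict.get?_insert]
          have hji : ¬ j = i := by intro he; rw [he, hm0i] at hj; exact absurd hj (by simp)
          rw [if_neg hji]; exact hsub j v hj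
        · intro j v hjn hj
          rw [PySem.Dict.get?_insert] at hj
          by_cases hji : j = i
          · rw [if_pos hji] at hj
            injection hj with h
            rw [← h, hji, hc]
          · rw [if_neg hji] at hj; exact hinv j v hjn hj

def GoodB (n : Int) (arr : List Int) (m0 dp : PySem.Dict Int Int) (lo : Int) : Prop :=
  (∀ j, lo ≤ j → j < n → m0.get? j = none → dp.get? j = some (fSpec j n arr m0)) ∧
  (∀ j v, dp.get? j = some v → v = fSpec j n arr m0 ∧ j ≠ n)

lemma valB_eq (n : Int) (arr : List Int) (m0 dp : PySem.Dict Int Int) (lo j : Int)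
    (hg : GoodB n arr m0 dp lo) (hlo : lo ≤ j) (hj : j ≤ n) :
    valB n m0 dp j = fSpec j n arr m0 := by
  by_cases hn : j = n
  · subst hn; rw [valB, fSpec]; simp
  · cases h : m0.get? j with
    | some v => rw [valB, fSpec]; simp [hn, h]
    | none =>
      have hj' : j < n := lt_of_le_of_ne hj hn
      have hd := hg.1 j hlo hj' h
      rw [valB]; simp [hn, h, hd]

lemma loopB (n : Int) (arr : List Int) (m0 : PySem.Dict Int Int) :
    ∀ (K : Nat) (top lo : Int) (dp : PySem.Dict Int Int), (top + 1 - lo).toNat ≤ K →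
    top < n → GoodB n arr m0 dp (top + 1) →
    GoodB n arr m0 ((PySem.List.pyRange top (lo-1) (-1)).foldl (stepB n arr m0) dp) lo := by
  intro K
  induction K using Nat.strong_induction_on with
  | _ K ih =>
  intro top lo dp hK htop hg
  by_cases hend : top ≤ lo - 1
  · rw [PySem.List.pyRange_neg_one_eq_nil hend]
    exact ⟨fun j hj hjn hm => hg.1 j (by omega) hjn hm, hg.2⟩
  · have hlt : lo - 1 < top := by omega
    rw [PySem.List.pyRange_neg_one_cons hlt]
    simp only [List.foldl_cons]
    have hstep : GoodB n arr m0 (stepB n arr m0 dp top) top := by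
      rw [stepB]
      by_cases hc : m0.contains top = true
      · simp only [hc, if_true]
        refine ⟨fun j hj hjn hm => ?_, hg.2⟩
        rcases eq_or_lt_of_le hj with he | hlt2
        · exfalso
          rw [he] at hc
          rw [PySem.Dict.contains_eq_isSome_get?, hm] at hc
          simp at hc
        · exact hg.1 j (by omega) hjn hm
      · have hc' : m0.contains top = false := by
          cases h : m0.contains top with
          | false => rfl
          | true => exact absurd h hc
        simp only [hc', Bool.false_eq_true, if_false]
        have hmtop : m0.get? top = none := by
          simp [PySem.Dict.get?_eq_none_iff_contains, hc']
        have hv1 : valB n m0 dp (top+1) = fSpec (top+1) n arr m0 :=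
          valB_eq n arr m0 dp (top+1) (top+1) hg le_rfl (by omega)
        have hceq : (if top + 3 ≤ n then
              min (|PySem.List.pyGetD arr (top-1) 0 - PySem.List.pyGetD arr top 0| + valB n m0 dp (top+1))
                  (|PySem.List.pyGetD arr (top-1) 0 - PySem.List.pyGetD arr (top+2) 0| + valB n m0 dp (top+3))
            else |PySem.List.pyGetD arr (top-1) 0 - PySem.List.pyGetD arr top 0| + valB n m0 dp (top+1))
            = fSpec top n arr m0 := by
          rw [fSpec]
          have hn' : ¬ top = n := by omega
          have h1 : top + 1 ≤ n := by omega
          by_cases h3 : top + 3 ≤ n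
          · have hv3 : valB n m0 dp (top+3) = fSpec (top+3) n arr m0 :=
              valB_eq n arr m0 dp (top+1) (top+3) hg (by omega) (by omega)
            simp [hn', hmtop, h1, h3, hv1, hv3]
          · simp [hn', hmtop, h1, h3, hv1]
        rw [hceq]
        refine ⟨fun j hj hjn hm => ?_, fun j v hjv => ?_⟩
        · rw [PySem.Dict.get?_insert]
          rcases eq_or_lt_of_le hj with he | hlt2
          · simp [← he]
          · have : ¬ j = top := by omega
            rw [if_neg this]
            exact hg.1 j (by omega) hjn hm
        · rw [PySem.Dict.get?_insert] at hjv
          by_cases hjt : j = top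
          · rw [if_pos hjt] at hjv
            refine ⟨by injection hjv with h; rw [← h, hjt], by omega⟩
          · rw [if_neg hjt] at hjv
            exact hg.2 j v hjv
    have hK' : K - 1 < K := by omega
    have := ih (K - 1) hK' (top - 1) lo (stepB n arr m0 dp top) (by omega) (by omega)
      (by simpa using hstep)
    simpa using this

-- ===== VERDICT (by name: the statement is the Claim_ definition above) =====
theorem solve_spec : Claim_equal_solve := by
  intro i n arr memo _hdom hpre
  unfold Spec_solve
  have hA := (solveA_fspec n arr (PySem.Dict.mk memo) ((n - i).toNat) i (PySem.Dict.mk memo)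
      le_rfl (fun _ _ h => h)
      (fun j v hjn h => by rw [fSpec]; simp [hjn, h])).1
  have hempty : GoodB n arr (PySem.Dict.mk memo) PySem.Dict.empty ((n-1) + 1) := by
    refine ⟨fun j hj hjn _ => by omega, fun j v h => ?_⟩
    rw [PySem.Dict.get?_empty] at h
    exact absurd h (by simp)
  have hgood := loopB n arr (PySem.Dict.mk memo) ((n - i).toNat) (n-1) i PySem.Dict.empty
      (by omega) (by omega) hempty
  simp only [solve, solve_alt]
  rw [hA]
  by_cases hn : i = n
  · rw [valB, fSpec]; simp [hn]
  · cases h : (PySem.Dict.mk memo).get? i with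
    | some v => rw [valB, fSpec]; simp [hn, h]
    | none =>
      have hmem : i ∉ memo.map Prod.fst := by
        rw [PySem.Dict.get?_eq_none_iff_not_mem_keys] at h
        simpa [PySem.Dict.keys_mk] using h
      have hlt : i < n := by
        rcases hpre with h1 | ⟨_, h2⟩ | ⟨h3, _, _⟩
        · exact absurd h1 hn
        · exact absurd h2 hmem
        · omega
      have hd := hgood.1 i le_rfl hlt h
      rw [valB]; simp [hn, h, hd]
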